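-- pv_equiv track=rewrite | github.com/shray732002/InterviewBit-solutions | Math/Is Rectangle?.py | solve
-- ===== SOURCE A (Python) =====
-- def solve(A, B, C, D):
--     lst=[]
--     lst.append(A)
--     lst.append(B)
--     lst.append(C)
--     lst.append(D)
--     lst1=[]
--     flag=0
--     for i in lst:
--         if i not in lst1:
--             lst1.append(i)
--     for i in lst1:
--         if(lst.count(i)==2 or lst.count(i)==4):
--             flag=1
--         else:
--             flag=0
--             break
--     if flag==1:
--         return 1
--     else:
--         return 0
-- ===== SOURCE B (Python) =====
-- def solve(A, B, C, D):
--     if (A == B and C == D) or (A == C and B == D) or (A == D and B == C):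
--         return 1
--     return 0
-- ===== Notes on version B (the rewrite author's own statement) =====
-- stated objective: simpler
-- what changed: Replaces A's dedup-list construction and per-distinct-value count scan by a closed-form check of the three possible pairings (A=B&C=D, A=C&B=D, A=D&B=C).
import Mathlib
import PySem

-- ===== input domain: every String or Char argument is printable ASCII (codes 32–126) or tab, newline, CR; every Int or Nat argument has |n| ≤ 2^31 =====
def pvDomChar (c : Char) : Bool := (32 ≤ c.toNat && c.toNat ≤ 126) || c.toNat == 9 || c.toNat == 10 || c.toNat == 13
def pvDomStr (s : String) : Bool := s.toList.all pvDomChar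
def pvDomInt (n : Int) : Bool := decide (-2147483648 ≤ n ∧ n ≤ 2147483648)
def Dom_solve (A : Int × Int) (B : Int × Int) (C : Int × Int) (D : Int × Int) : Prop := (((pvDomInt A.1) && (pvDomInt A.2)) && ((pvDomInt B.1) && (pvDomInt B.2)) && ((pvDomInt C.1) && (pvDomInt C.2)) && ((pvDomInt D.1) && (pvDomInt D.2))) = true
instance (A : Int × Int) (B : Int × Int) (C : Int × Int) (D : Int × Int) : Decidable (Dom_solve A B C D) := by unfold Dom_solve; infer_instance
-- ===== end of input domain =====

-- ===== PORT A =====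
-- B is a closed-form three-pairing check instead of A's dedup-list + count scan (objective: simpler).

-- the `for i in lst1` loop: flag:=1 while counts are 2 or 4, flag:=0 and break otherwise
def solveFlagLoop (lst : List (Int × Int)) : List (Int × Int) → Int → Int
  | [], flag => flag
  | i :: rest, _ =>
      if PySem.List.count lst i == 2 || PySem.List.count lst i == 4 then
        solveFlagLoop lst rest 1
      else 0

def solve (A : Int × Int) (B : Int × Int) (C : Int × Int) (D : Int × Int) : Int :=
  let lst : List (Int × Int) := [A, B, C, D]
  let lst1 := lst.foldl (fun acc i => if i ∈ acc then acc else acc ++ [i]) []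
  let flag := solveFlagLoop lst lst1 0
  if flag == 1 then 1 else 0

-- ===== PORT B =====
def solve_alt (A : Int × Int) (B : Int × Int) (C : Int × Int) (D : Int × Int) : Int :=
  if (A = B ∧ C = D) ∨ (A = C ∧ B = D) ∨ (A = D ∧ B = C) then 1 else 0

-- ===== PRECONDITION & SPEC =====
def Spec_solve (A : Int × Int) (B : Int × Int) (C : Int × Int) (D : Int × Int) (out : Int) : Prop := out = solve_alt A B C D
instance (A : Int × Int) (B : Int × Int) (C : Int × Int) (D : Int × Int) (out : Int) : Decidable (Spec_solve A B C D out) := by unfold Spec_solve; infer_instance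

-- ===== CLAIM (what is proved, stated in full; the proofs are below) =====
def Claim_equal_solve : Prop := ∀ (A : Int × Int) (B : Int × Int) (C : Int × Int) (D : Int × Int), Dom_solve A B C D → Spec_solve A B C D (solve A B C D)

-- ===== LEMMAS AND PROOFS =====

-- ===== VERDICT (by name: the statement is the Claim_ definition above) =====
theorem solve_spec : Claim_equal_solve := by
  intro A B C D _
  unfold Spec_solve solve solve_alt
  by_cases h1 : A = B <;> by_cases h2 : A = C <;> by_cases h3 : A = D <;>
    by_cases h4 : B = C <;> by_cases h5 : B = D <;> by_cases h6 : C = D <;>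
    simp_all [solveFlagLoop, PySem.List.count, eq_comm]
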